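-- pv_equiv track=rewrite | github.com/gavinsyw/exact-repair-coding | 4,2,2-exact-repair/generateInequalities.py | find_growth
-- ===== SOURCE A (Python) =====
-- def find_growth(s):
--     growth = s
--     flag = False
--     for i in range(0, 3):
--         if growth[i] == '1':
--             if growth[2*i+3] != '1' or growth[2*i+4] != '1':
--                 growth[2*i+3] = growth[2*i+4] = '1'
--                 flag = True
--     if growth[5] == '1' and growth[7] == '1':
--         if growth[0] != '1':
--             growth[0] = '1'
--             flag = True
--     if growth[3] == '1' and growth[8] == '1':
--         if growth[1] != '1':
--             growth[1] = '1'
--             flag = True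
--     if growth[4] == '1' and growth[6] == '1':
--         if growth[2] != '1':
--             growth[2] = '1'
--             flag = True
--     if not flag:
--         # save the result
--         return ''.join(growth)
--     else:
--         return find_growth(growth)
-- ===== SOURCE B (Python) =====
-- def find_growth(s):
--     # Bit-vector fixpoint: compute which of the 9 flags end up '1' by iterating
--     # the monotone rule step 9 times on booleans, then write '1' back in place.
--     a0, a1, a2, a3, a4, a5, a6, a7, a8 = (x == '1' for x in s[:9])
--     for _ in range(9):
--         a0, a1, a2, a3, a4, a5, a6, a7, a8 = (
--             a0 or (a5 and a7),
--             a1 or (a3 and a8),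
--             a2 or (a4 and a6),
--             a3 or a0,
--             a4 or a0,
--             a5 or a1,
--             a6 or a1,
--             a7 or a2,
--             a8 or a2,
--         )
--     for i, b in enumerate((a0, a1, a2, a3, a4, a5, a6, a7, a8)):
--         if b:
--             s[i] = '1'
--     return ''.join(s)
-- ===== Notes on version B (the rewrite author's own statement) =====
-- stated objective: alternative
-- what changed: A propagates the flags by repeatedly re-running its mutating pass via self-recursion until nothing changes; B abstracts the nine cells to booleans, reaches the fixpoint by nine simultaneous iterations of the monotone rule step on that bit-vector, and then writes '1' back into the list in one pass.
-- outside the precondition, e.g. on find_growth(['0', '0', '0', '0', '0', '0']): A returns '000000', B raises ValueError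
import Mathlib
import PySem

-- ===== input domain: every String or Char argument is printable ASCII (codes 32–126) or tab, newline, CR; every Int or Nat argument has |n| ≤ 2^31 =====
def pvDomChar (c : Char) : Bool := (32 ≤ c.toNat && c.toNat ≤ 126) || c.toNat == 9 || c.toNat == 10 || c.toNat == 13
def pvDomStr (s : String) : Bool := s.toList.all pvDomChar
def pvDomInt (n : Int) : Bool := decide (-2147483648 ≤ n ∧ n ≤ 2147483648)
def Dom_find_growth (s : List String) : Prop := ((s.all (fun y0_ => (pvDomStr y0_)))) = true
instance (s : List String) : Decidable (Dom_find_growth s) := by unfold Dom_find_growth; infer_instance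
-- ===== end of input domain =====

set_option maxRecDepth 8000
set_option maxHeartbeats 1000000


-- B replaces A's recursive in-place rewriting with a boolean-vector fixpoint (9 simultaneous
-- iterations of the monotone rule step) followed by one write-back pass; A and B mutate the
-- argument list identically in Python, and the theorems below are about the return value.

-- ===== PORT A =====
-- A's loop body, one rule at a time: the i-th round of `for i in range(3)` …
def updTriple (st : List String × Bool) (i : Nat) : List String × Bool :=
  if st.1.getD i "" == "1" then
    if !(st.1.getD (2*i+3) "" == "1") || !(st.1.getD (2*i+4) "" == "1") then
      (((st.1.set (2*i+3) "1").set (2*i+4) "1"), true)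
    else st
  else st

-- … and the three pair rules.
def updPair (st : List String × Bool) (a b t : Nat) : List String × Bool :=
  if st.1.getD a "" == "1" && st.1.getD b "" == "1" then
    if !(st.1.getD t "" == "1") then (st.1.set t "1", true) else st
  else st

-- One full pass of A's body (everything before the final if/return).
def passA (g : List String) : List String × Bool :=
  updPair (updPair (updPair ([0, 1, 2].foldl updTriple (g, false)) 5 7 0) 3 8 1) 4 6 2

-- A's self-recursion, with fuel as a pure totality guard: each flagged pass turns at least one
-- of the nine inspected cells into "1" for good, so 10 rounds are always enough (proved below:
-- goA 10 computes the fixpoint; the fuel-0 branch is never reached on inputs in Pre_).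
def goA : Nat → List String → String
  | 0, g => PySem.Str.join "" g
  | n + 1, g =>
    let p := passA g
    if p.2 then goA n p.1 else PySem.Str.join "" p.1

def find_growth (s : List String) : String :=
  if s.length < 9 then ""   -- Python raises IndexError here; excluded by Pre_find_growth
  else goA 10 s

-- ===== PORT B =====
abbrev Mask := Bool × Bool × Bool × Bool × Bool × Bool × Bool × Bool × Bool

-- Source B: a_k = s[k] == '1'
def maskOf (g : List String) : Mask :=
  (g.getD 0 "" == "1", g.getD 1 "" == "1", g.getD 2 "" == "1",
   g.getD 3 "" == "1", g.getD 4 "" == "1", g.getD 5 "" == "1",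
   g.getD 6 "" == "1", g.getD 7 "" == "1", g.getD 8 "" == "1")

-- one simultaneous boolean step of all nine rules …
def stepB : Mask → Mask
  | (a0, a1, a2, a3, a4, a5, a6, a7, a8) =>
    (a0 || (a5 && a7), a1 || (a3 && a8), a2 || (a4 && a6),
     a3 || a0, a4 || a0, a5 || a1, a6 || a1, a7 || a2, a8 || a2)

-- … the write-back loop `for i, b in enumerate(...): if b: s[i] = '1'`, unrolled over the tuple.
def writeApp (b : Bool) (i : Nat) (g : List String) : List String := if b then g.set i "1" else g

def writeBackB : Mask → List String → List String
  | (a0, a1, a2, a3, a4, a5, a6, a7, a8), g =>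
    writeApp a8 8 (writeApp a7 7 (writeApp a6 6 (writeApp a5 5 (writeApp a4 4
      (writeApp a3 3 (writeApp a2 2 (writeApp a1 1 (writeApp a0 0 g))))))))

def find_growth_alt (s : List String) : String :=
  if s.length < 9 then ""   -- Python raises ValueError (tuple unpacking); excluded by Pre_find_growth
  else
    let m := maskOf s
    let m := (List.range 9).foldl (fun acc _ => stepB acc) m   -- for _ in range(9)
    PySem.Str.join "" (writeBackB m s)

-- ===== PRECONDITION & SPEC =====
-- Pre_ excludes lists with fewer than 9 elements: there A either raises IndexError or, when its
-- short-circuited conditions skip the out-of-range reads, returns the plain concatenation, while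
-- B's 9-cell tuple unpacking always raises ValueError.
def Pre_find_growth (s : List String) : Prop := 9 ≤ s.length
instance (s : List String) : Decidable (Pre_find_growth s) := by unfold Pre_find_growth; infer_instance

def pvWitness_find_growth : List String :=
  ["1", "0", "0", "0", "0", "0", "0", "0", "0"]

def Spec_find_growth (s : List String) (out : String) : Prop := out = find_growth_alt s
instance (s : List String) (out : String) : Decidable (Spec_find_growth s out) := by unfold Spec_find_growth; infer_instance

-- ===== CLAIM (what is proved, stated in full; the proofs are below) =====
def Claim_equal_find_growth : Prop := ∀ (s : List String), Dom_find_growth s → Pre_find_growth s → Spec_find_growth s (find_growth s)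

-- ===== LEMMAS AND PROOFS =====

-- the termination measure: number of inspected cells still ≠ "1"
def nuM : Mask → Nat
  | (a0, a1, a2, a3, a4, a5, a6, a7, a8) =>
    (if a0 then 0 else 1) + (if a1 then 0 else 1) + (if a2 then 0 else 1) +
    (if a3 then 0 else 1) + (if a4 then 0 else 1) + (if a5 then 0 else 1) +
    (if a6 then 0 else 1) + (if a7 then 0 else 1) + (if a8 then 0 else 1)

-- The same six rules at mask level (used by the termination measure and the proofs).
def tM0 : Mask × Bool → Mask × Bool
  | ((a0, a1, a2, a3, a4, a5, a6, a7, a8), f) =>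
    if a0 then
      if !a3 || !a4 then ((a0, a1, a2, true, true, a5, a6, a7, a8), true)
      else ((a0, a1, a2, a3, a4, a5, a6, a7, a8), f)
    else ((a0, a1, a2, a3, a4, a5, a6, a7, a8), f)

def tM1 : Mask × Bool → Mask × Bool
  | ((a0, a1, a2, a3, a4, a5, a6, a7, a8), f) =>
    if a1 then
      if !a5 || !a6 then ((a0, a1, a2, a3, a4, true, true, a7, a8), true)
      else ((a0, a1, a2, a3, a4, a5, a6, a7, a8), f)
    else ((a0, a1, a2, a3, a4, a5, a6, a7, a8), f)

def tM2 : Mask × Bool → Mask × Bool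
  | ((a0, a1, a2, a3, a4, a5, a6, a7, a8), f) =>
    if a2 then
      if !a7 || !a8 then ((a0, a1, a2, a3, a4, a5, a6, true, true), true)
      else ((a0, a1, a2, a3, a4, a5, a6, a7, a8), f)
    else ((a0, a1, a2, a3, a4, a5, a6, a7, a8), f)

def pM0 : Mask × Bool → Mask × Bool
  | ((a0, a1, a2, a3, a4, a5, a6, a7, a8), f) =>
    if a5 && a7 then
      if !a0 then ((true, a1, a2, a3, a4, a5, a6, a7, a8), true)
      else ((a0, a1, a2, a3, a4, a5, a6, a7, a8), f)
    else ((a0, a1, a2, a3, a4, a5, a6, a7, a8), f)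

def pM1 : Mask × Bool → Mask × Bool
  | ((a0, a1, a2, a3, a4, a5, a6, a7, a8), f) =>
    if a3 && a8 then
      if !a1 then ((a0, true, a2, a3, a4, a5, a6, a7, a8), true)
      else ((a0, a1, a2, a3, a4, a5, a6, a7, a8), f)
    else ((a0, a1, a2, a3, a4, a5, a6, a7, a8), f)

def pM2 : Mask × Bool → Mask × Bool
  | ((a0, a1, a2, a3, a4, a5, a6, a7, a8), f) =>
    if a4 && a6 then
      if !a2 then ((a0, a1, true, a3, a4, a5, a6, a7, a8), true)
      else ((a0, a1, a2, a3, a4, a5, a6, a7, a8), f)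
    else ((a0, a1, a2, a3, a4, a5, a6, a7, a8), f)

def passM (m : Mask) : Mask × Bool := pM2 (pM1 (pM0 (tM2 (tM1 (tM0 (m, false))))))

-- "list step f is abstracted by mask step fm": length kept, mask/flag tracked, and the list
-- only changes by writing "1" below index 9.
def StepOK (f : List String × Bool → List String × Bool)
    (fm : Mask × Bool → Mask × Bool) : Prop :=
  ∀ (g : List String) (fl : Bool), 9 ≤ g.length →
    (f (g, fl)).1.length = g.length ∧
    maskOf (f (g, fl)).1 = (fm (maskOf g, fl)).1 ∧
    (f (g, fl)).2 = (fm (maskOf g, fl)).2 ∧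
    (∀ j : Nat, (f (g, fl)).1[j]? = g[j]? ∨ (j < 9 ∧ (f (g, fl)).1[j]? = some "1"))

theorem wstep_set (g : List String) (k : Nat) (hk : k < 9) :
    ∀ j : Nat, (g.set k "1")[j]? = g[j]? ∨ (j < 9 ∧ (g.set k "1")[j]? = some "1") := by
  intro j
  by_cases hj : j = k
  · subst hj
    by_cases hl : j < g.length
    · exact Or.inr ⟨by omega, by simp [hl]⟩
    · exact Or.inl (by rw [List.set_eq_of_length_le (by omega)])
  · exact Or.inl (List.getElem?_set_ne (fun h => hj h.symm))

theorem wtrans {g1 g2 g3 : List String}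
    (h12 : ∀ j : Nat, g2[j]? = g1[j]? ∨ (j < 9 ∧ g2[j]? = some "1"))
    (h23 : ∀ j : Nat, g3[j]? = g2[j]? ∨ (j < 9 ∧ g3[j]? = some "1")) :
    ∀ j : Nat, g3[j]? = g1[j]? ∨ (j < 9 ∧ g3[j]? = some "1") := by
  intro j
  rcases h23 j with h | h
  · rcases h12 j with h' | h'
    · exact Or.inl (h.trans h')
    · exact Or.inr ⟨h'.1, h.trans h'.2⟩
  · exact Or.inr h

theorem wrefl (g : List String) :
    ∀ j : Nat, g[j]? = g[j]? ∨ (j < 9 ∧ g[j]? = some "1") := fun _ => Or.inl rfl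

theorem stepOK_comp {f h : List String × Bool → List String × Bool}
    {fm hm : Mask × Bool → Mask × Bool}
    (Hf : StepOK f fm) (Hh : StepOK h hm) :
    StepOK (fun st => h (f st)) (fun st => hm (fm st)) := by
  intro g fl h9
  obtain ⟨l1, m1, f1, w1⟩ := Hf g fl h9
  obtain ⟨l2, m2, f2, w2⟩ := Hh (f (g, fl)).1 (f (g, fl)).2 (by rw [l1]; exact h9)
  have e : ((maskOf (f (g, fl)).1, (f (g, fl)).2) : Mask × Bool) = fm (maskOf g, fl) := by
    rw [m1, f1]
  rw [e] at m2 f2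
  exact ⟨l2.trans l1, m2, f2, wtrans w1 w2⟩

theorem updTriple0_ok : StepOK (fun st => updTriple st 0) tM0 := by
  intro g fl h9
  have h3 : (3 : Nat) < g.length := by omega
  have h4 : (4 : Nat) < g.length := by omega
  simp only [updTriple, tM0, maskOf]
  norm_num
  split_ifs with h1 h2
  · refine ⟨by simp, ?_, rfl, wtrans (wstep_set g 3 (by omega)) (wstep_set _ 4 (by omega))⟩
    simp [h3, h4]
  · exact ⟨rfl, rfl, rfl, wrefl g⟩
  · exact ⟨rfl, rfl, rfl, wrefl g⟩

theorem updTriple1_ok : StepOK (fun st => updTriple st 1) tM1 := by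
  intro g fl h9
  have h5 : (5 : Nat) < g.length := by omega
  have h6 : (6 : Nat) < g.length := by omega
  simp only [updTriple, tM1, maskOf]
  norm_num
  split_ifs with h1 h2
  · refine ⟨by simp, ?_, rfl, wtrans (wstep_set g 5 (by omega)) (wstep_set _ 6 (by omega))⟩
    simp [h5, h6]
  · exact ⟨rfl, rfl, rfl, wrefl g⟩
  · exact ⟨rfl, rfl, rfl, wrefl g⟩

theorem updTriple2_ok : StepOK (fun st => updTriple st 2) tM2 := by
  intro g fl h9
  have h7 : (7 : Nat) < g.length := by omega
  have h8 : (8 : Nat) < g.length := by omega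
  simp only [updTriple, tM2, maskOf]
  norm_num
  split_ifs with h1 h2
  · refine ⟨by simp, ?_, rfl, wtrans (wstep_set g 7 (by omega)) (wstep_set _ 8 (by omega))⟩
    simp [h7, h8]
  · exact ⟨rfl, rfl, rfl, wrefl g⟩
  · exact ⟨rfl, rfl, rfl, wrefl g⟩

theorem updPair0_ok : StepOK (fun st => updPair st 5 7 0) pM0 := by
  intro g fl h9
  have h0 : (0 : Nat) < g.length := by omega
  simp only [updPair, pM0, maskOf]
  split_ifs with h1 h2
  · refine ⟨by simp, ?_, rfl, wstep_set g 0 (by omega)⟩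
    simp [h0]
  · exact ⟨rfl, rfl, rfl, wrefl g⟩
  · exact ⟨rfl, rfl, rfl, wrefl g⟩

theorem updPair1_ok : StepOK (fun st => updPair st 3 8 1) pM1 := by
  intro g fl h9
  have h0 : (1 : Nat) < g.length := by omega
  simp only [updPair, pM1, maskOf]
  split_ifs with h1 h2
  · refine ⟨by simp, ?_, rfl, wstep_set g 1 (by omega)⟩
    simp [h0]
  · exact ⟨rfl, rfl, rfl, wrefl g⟩
  · exact ⟨rfl, rfl, rfl, wrefl g⟩

theorem updPair2_ok : StepOK (fun st => updPair st 4 6 2) pM2 := by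
  intro g fl h9
  have h0 : (2 : Nat) < g.length := by omega
  simp only [updPair, pM2, maskOf]
  split_ifs with h1 h2
  · refine ⟨by simp, ?_, rfl, wstep_set g 2 (by omega)⟩
    simp [h0]
  · exact ⟨rfl, rfl, rfl, wrefl g⟩
  · exact ⟨rfl, rfl, rfl, wrefl g⟩

theorem passA_ok (s : List String) (h9 : 9 ≤ s.length) :
    (passA s).1.length = s.length ∧
    maskOf (passA s).1 = (passM (maskOf s)).1 ∧
    (passA s).2 = (passM (maskOf s)).2 ∧
    (∀ j : Nat, (passA s).1[j]? = s[j]? ∨ (j < 9 ∧ (passA s).1[j]? = some "1")) := by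
  have H := stepOK_comp (stepOK_comp (stepOK_comp (stepOK_comp (stepOK_comp
    updTriple0_ok updTriple1_ok) updTriple2_ok) updPair0_ok) updPair1_ok) updPair2_ok
  exact H s false h9

theorem passM_true_nu : ∀ m : Mask, (passM m).2 = true → nuM (passM m).1 < nuM m := by decide

-- ===== LEMMAS AND PROOFS =====

-- A's recursion at mask level, with fuel (fuel 10 always suffices: nuM m ≤ 9).
def recMFuel : Nat → Mask → Mask
  | 0, m => m
  | n + 1, m => if (passM m).2 = true then recMFuel n (passM m).1 else m

-- Bool-valued equality on Mask (DecidableEq for the 9-fold product is beyond the default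
-- instance-search size, so the `decide`s below go through this).
def maskEq : Mask → Mask → Bool
  | (a0, a1, a2, a3, a4, a5, a6, a7, a8), (b0, b1, b2, b3, b4, b5, b6, b7, b8) =>
    (a0 == b0) && (a1 == b1) && (a2 == b2) && (a3 == b3) && (a4 == b4) &&
    (a5 == b5) && (a6 == b6) && (a7 == b7) && (a8 == b8)

theorem maskEq_eq : ∀ {m M : Mask}, maskEq m M = true → m = M := by
  rintro ⟨a0, a1, a2, a3, a4, a5, a6, a7, a8⟩ ⟨b0, b1, b2, b3, b4, b5, b6, b7, b8⟩ h
  simp only [maskEq, Bool.and_eq_true, beq_iff_eq] at h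
  obtain ⟨⟨⟨⟨⟨⟨⟨⟨h0, h1⟩, h2⟩, h3⟩, h4⟩, h5⟩, h6⟩, h7⟩, h8⟩ := h
  subst h0 h1 h2 h3 h4 h5 h6 h7 h8
  rfl

theorem recM_9_eq_10 (m : Mask) : recMFuel 9 m = recMFuel 10 m :=
  maskEq_eq (by revert m; decide)

theorem recM_eq_iterB (m : Mask) :
    recMFuel 10 m = (List.range 9).foldl (fun acc _ => stepB acc) m :=
  maskEq_eq (by revert m; decide)

def bitget (m : Mask) (j : Nat) : Bool :=
  if j = 0 then m.1 else if j = 1 then m.2.1 else if j = 2 then m.2.2.1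
  else if j = 3 then m.2.2.2.1 else if j = 4 then m.2.2.2.2.1
  else if j = 5 then m.2.2.2.2.2.1 else if j = 6 then m.2.2.2.2.2.2.1
  else if j = 7 then m.2.2.2.2.2.2.2.1 else if j = 8 then m.2.2.2.2.2.2.2.2 else false

def maskLe : Mask → Mask → Bool
  | (a0, a1, a2, a3, a4, a5, a6, a7, a8), (b0, b1, b2, b3, b4, b5, b6, b7, b8) =>
    (!a0 || b0) && (!a1 || b1) && (!a2 || b2) && (!a3 || b3) && (!a4 || b4) &&
    (!a5 || b5) && (!a6 || b6) && (!a7 || b7) && (!a8 || b8)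

theorem recM_le : ∀ m : Mask, maskLe m (recMFuel 10 m) = true := by decide

theorem bitget_true_lt {m : Mask} {j : Nat} (h : bitget m j = true) : j < 9 := by
  unfold bitget at h
  split_ifs at h <;> omega

theorem maskLe_bitget {m M : Mask} (h : maskLe m M = true) {j : Nat}
    (hb : bitget m j = true) : bitget M j = true := by
  obtain ⟨a0, a1, a2, a3, a4, a5, a6, a7, a8⟩ := m
  obtain ⟨b0, b1, b2, b3, b4, b5, b6, b7, b8⟩ := M
  have hj : j < 9 := bitget_true_lt hb
  simp only [maskLe, Bool.and_eq_true, Bool.or_eq_true, Bool.not_eq_eq_eq_not, Bool.not_true] at h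
  interval_cases j <;> simp_all [bitget]

theorem maskOf_bitget (g : List String) (j : Nat) (hj : j < 9) :
    bitget (maskOf g) j = (g.getD j "" == "1") := by
  interval_cases j <;> rfl

theorem getD_eq_one_iff (g : List String) (j : Nat) :
    (g.getD j "" == "1") = true ↔ g[j]? = some "1" := by
  cases h : g[j]? <;> simp [List.getD_eq_getElem?_getD, h]

theorem writeApp_length (b : Bool) (i : Nat) (g : List String) :
    (writeApp b i g).length = g.length := by
  unfold writeApp; split <;> simp

theorem writeApp_getElem?_ne (b : Bool) (i : Nat) (g : List String) {j : Nat} (h : j ≠ i) :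
    (writeApp b i g)[j]? = g[j]? := by
  unfold writeApp; split
  · exact List.getElem?_set_ne (fun hh => h hh.symm)
  · rfl

theorem writeApp_getElem?_self (b : Bool) (i : Nat) (g : List String) :
    (writeApp b i g)[i]? = if b = true ∧ i < g.length then some "1" else g[i]? := by
  unfold writeApp
  by_cases hb : b = true
  · simp only [hb, if_true, true_and]
    by_cases hl : i < g.length
    · simp [hl]
    · rw [List.set_eq_of_length_le (by omega), if_neg hl]
  · simp [hb]

theorem wb_getElem? (m : Mask) (g : List String) (j : Nat) :
    (writeBackB m g)[j]? = if bitget m j = true ∧ j < g.length then some "1" else g[j]? := by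
  obtain ⟨a0, a1, a2, a3, a4, a5, a6, a7, a8⟩ := m
  by_cases hj : j < 9
  · interval_cases j <;>
      simp [writeBackB, writeApp_getElem?_ne, writeApp_getElem?_self, writeApp_length, bitget]
  · have hb : bitget (a0, a1, a2, a3, a4, a5, a6, a7, a8) j = false := by
      unfold bitget; split_ifs <;> first | omega | rfl
    rw [hb]
    simp only [Bool.false_eq_true, false_and, if_false, writeBackB]
    rw [writeApp_getElem?_ne _ _ _ (by omega), writeApp_getElem?_ne _ _ _ (by omega),
        writeApp_getElem?_ne _ _ _ (by omega), writeApp_getElem?_ne _ _ _ (by omega),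
        writeApp_getElem?_ne _ _ _ (by omega), writeApp_getElem?_ne _ _ _ (by omega),
        writeApp_getElem?_ne _ _ _ (by omega), writeApp_getElem?_ne _ _ _ (by omega),
        writeApp_getElem?_ne _ _ _ (by omega)]

theorem wb_congr (M : Mask) (g g' : List String) (hlen : g'.length = g.length)
    (hW : ∀ j : Nat, g'[j]? = g[j]? ∨ (j < 9 ∧ g'[j]? = some "1"))
    (hle : ∀ j : Nat, j < 9 → g'[j]? = some "1" → bitget M j = true) :
    writeBackB M g' = writeBackB M g := by
  apply List.ext_getElem?
  intro j
  rw [wb_getElem?, wb_getElem?, hlen]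
  rcases hW j with h | ⟨hj9, h1⟩
  · rw [h]
  · have hb := hle j hj9 h1
    have hlt : j < g'.length := by
      by_contra hc
      rw [List.getElem?_eq_none (by omega)] at h1
      simp at h1
    rw [hb]
    simp only [true_and]
    rw [if_pos (hlen ▸ hlt), if_pos (hlen ▸ hlt)]

theorem wb_self (g : List String) : writeBackB (maskOf g) g = g := by
  apply List.ext_getElem?
  intro j
  rw [wb_getElem?]
  split_ifs with h
  · obtain ⟨hb, hl⟩ := h
    have hj : j < 9 := bitget_true_lt hb
    rw [maskOf_bitget g j hj] at hb
    exact ((getD_eq_one_iff g j).mp hb).symm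
  · rfl

theorem updTriple_false {st : List String × Bool} {i : Nat}
    (h : (updTriple st i).2 = false) : updTriple st i = st := by
  unfold updTriple at h ⊢
  split_ifs at h ⊢ <;> simp_all

theorem updPair_false {st : List String × Bool} {a b t : Nat}
    (h : (updPair st a b t).2 = false) : updPair st a b t = st := by
  unfold updPair at h ⊢
  split_ifs at h ⊢ <;> simp_all

theorem passA_false (s : List String) (h : (passA s).2 = false) : (passA s).1 = s := by
  unfold passA at h ⊢
  simp only [List.foldl_cons, List.foldl_nil] at h ⊢
  have e1 := updPair_false h
  rw [e1] at h
  have e2 := updPair_false h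
  rw [e2] at h
  have e3 := updPair_false h
  rw [e3] at h
  have e4 := updTriple_false h
  rw [e4] at h
  have e5 := updTriple_false h
  rw [e5] at h
  have e6 := updTriple_false h
  rw [e1, e2, e3, e4, e5, e6]

theorem nuM_lt_10 : ∀ m : Mask, nuM m < 10 := by decide

theorem recM_of_flag_false {m : Mask} (h : (passM m).2 = false) : recMFuel 10 m = m := by
  show (if (passM m).2 = true then recMFuel 9 (passM m).1 else m) = m
  rw [h]
  simp

theorem goA_char (n : Nat) (g : List String) (hn : nuM (maskOf g) < n) (h9 : 9 ≤ g.length) :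
    goA n g = PySem.Str.join "" (writeBackB (recMFuel 10 (maskOf g)) g) := by
  induction n generalizing g with
  | zero => omega
  | succ n IH =>
    show (if (passA g).2 = true then goA n (passA g).1
          else PySem.Str.join "" (passA g).1) = _
    obtain ⟨hlen, hm, hfl, hW⟩ := passA_ok g h9
    by_cases hf : (passA g).2 = true
    · rw [if_pos hf]
      have hpf : (passM (maskOf g)).2 = true := hfl ▸ hf
      have hnu : nuM (maskOf (passA g).1) < n := by
        rw [hm]
        have := passM_true_nu (maskOf g) hpf
        omega
      rw [IH (passA g).1 hnu (by omega)]
      refine congrArg _ ?_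
      have hrw : recMFuel 10 (maskOf (passA g).1) = recMFuel 10 (maskOf g) := by
        rw [hm, ← recM_9_eq_10]
        show recMFuel 9 (passM (maskOf g)).1 =
          (if (passM (maskOf g)).2 = true then recMFuel 9 (passM (maskOf g)).1 else maskOf g)
        rw [hpf]
        simp
      rw [hrw]
      apply wb_congr _ _ _ hlen hW
      intro j hj h1
      have hb : bitget (maskOf (passA g).1) j = true := by
        rw [maskOf_bitget _ j hj]
        exact (getD_eq_one_iff _ j).mpr h1
      have h2 : bitget (recMFuel 10 (maskOf (passA g).1)) j = true :=
        maskLe_bitget (recM_le _) hb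
      rw [← hrw]
      exact h2
    · rw [if_neg hf, passA_false g (Bool.eq_false_iff.mpr hf)]
      rw [recM_of_flag_false (by rw [← hfl]; exact Bool.eq_false_iff.mpr hf), wb_self]

-- ===== VERDICT (by name: the statement is the Claim_ definition above) =====
theorem find_growth_spec : Claim_equal_find_growth := by
  intro s _ hpre
  unfold Spec_find_growth find_growth find_growth_alt
  rw [if_neg (by unfold Pre_find_growth at hpre; omega), if_neg (by unfold Pre_find_growth at hpre; omega)]
  rw [goA_char 10 s (nuM_lt_10 (maskOf s)) hpre]
  rw [recM_eq_iterB]
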